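-- pv_equiv track=rewrite | github.com/edwak97/aoc_solutions_22 | day3.py | getBadge
-- ===== SOURCE A (Python) =====
-- charList = [chr(x) for x in range(ord('a'), ord('z')+1)] + [chr(x) for x in range(ord('A'), ord('Z')+1)]
--
-- def getIndexByValue(char):
-- 	for x in range(len(charList)):
-- 		if charList[x] == char:
-- 			return x
--
-- def getBadge(group):
-- 	for char in charList:
-- 		found = False
-- 		for line in group:
-- 			found = False
-- 			for c in line:
-- 				if c == char:
-- 					found = True
-- 					break
-- 			if not found:
-- 				break
-- 		if found:
-- 			return getIndexByValue(char)+1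
-- ===== SOURCE B (Python) =====
-- charList = [chr(x) for x in range(ord('a'), ord('z')+1)] + [chr(x) for x in range(ord('A'), ord('Z')+1)]
--
-- def getBadge(group):
--     # one pass: count, per line, each distinct character once
--     cnt = {}
--     for line in group:
--         for c in set(line):
--             cnt[c] = cnt.get(c, 0) + 1
--     n = len(group)
--     # one scan over the priority order: first char present in every line
--     for i, ch in enumerate(charList):
--         if cnt.get(ch) == n:
--             return i + 1
-- ===== Notes on version B (the rewrite author's own statement) =====
-- stated objective: alternative
-- what changed: A rescans every line of the group for each of the 52 candidate characters with three nested loops; B makes one counting pass over the group (a dict counting each line's distinct characters once) and then a single enumerate scan of the priority list returning i+1 for the first character whose count equals len(group).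
import Mathlib
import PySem

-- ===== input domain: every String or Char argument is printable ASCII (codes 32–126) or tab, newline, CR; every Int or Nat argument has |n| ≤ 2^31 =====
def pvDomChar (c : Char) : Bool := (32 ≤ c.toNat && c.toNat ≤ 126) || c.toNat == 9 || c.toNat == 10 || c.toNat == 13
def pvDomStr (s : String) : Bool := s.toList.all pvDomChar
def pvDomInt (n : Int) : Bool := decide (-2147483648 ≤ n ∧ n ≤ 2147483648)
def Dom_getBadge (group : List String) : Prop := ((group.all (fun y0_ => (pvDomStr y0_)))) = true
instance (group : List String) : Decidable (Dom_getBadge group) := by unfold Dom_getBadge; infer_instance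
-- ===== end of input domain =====

-- B replaces A's per-candidate rescan of all lines by one counting pass over the
-- group (each line's distinct characters once) followed by a single scan of the
-- priority list (objective: alternative decomposition; same observable result).

-- ===== PORT A =====
-- charList = [chr(x) for x in range(ord('a'), ord('z')+1)] + [chr(x) for x in range(ord('A'), ord('Z')+1)]
def pvCharList : List Char :=
  (PySem.List.pyRange 97 123 1).map (fun x => Char.ofNat x.toNat)
    ++ (PySem.List.pyRange 65 91 1).map (fun x => Char.ofNat x.toNat)

-- inner loop of getBadge: found = False; for c in line: if c == char: found = True; break
def pvLineHas : List Char → Char → Bool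
  | [], _ => false
  | c :: rest, ch => if c == ch then true else pvLineHas rest ch

-- middle loop of getBadge over the lines, threading `found`
def pvCheckAll : List String → Char → Bool → Bool
  | [], _, found => found
  | line :: rest, ch, _ =>
      let found := pvLineHas line.toList ch
      if !found then found else pvCheckAll rest ch found

-- getIndexByValue: for x in range(len(charList)): if charList[x] == char: return x
def pvIdxLoop : List Int → Char → Option Int
  | [], _ => none
  | x :: r, ch =>
      if PySem.List.pyGetD pvCharList x ' ' == ch then some x else pvIdxLoop r ch

def getIndexByValue (ch : Char) : Option Int :=
  pvIdxLoop (PySem.List.pyRange 0 (pvCharList.length : Int) 1) ch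

-- outer loop of getBadge over charList (falling through the loop yields None)
def pvBadgeLoop : List Char → List String → Option Int
  | [], _ => none
  | ch :: rest, group =>
      if pvCheckAll group ch false then (getIndexByValue ch).map (· + 1)
      else pvBadgeLoop rest group

def getBadge (group : List String) : Option Int := pvBadgeLoop pvCharList group

-- ===== PORT B =====
-- cnt = {}; for line in group: for c in set(line): cnt[c] = cnt.get(c, 0) + 1
def pvBuildCnt (group : List String) : PySem.Dict Char Int :=
  group.foldl
    (fun d line =>
      (PySem.Set.ofList line.toList).foldl (fun d c => d.modify c 0 (· + 1)) d)
    PySem.Dict.empty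

-- for i, ch in enumerate(charList): if cnt.get(ch) == n: return i + 1
def pvScan : List (Int × Char) → PySem.Dict Char Int → Int → Option Int
  | [], _, _ => none
  | (i, ch) :: rest, cnt, n =>
      if cnt.get? ch == some n then some (i + 1) else pvScan rest cnt n

def getBadge_alt (group : List String) : Option Int :=
  let cnt := pvBuildCnt group
  let n : Int := (group.length : Int)
  pvScan (PySem.List.enumerate pvCharList 0) cnt n

-- ===== PRECONDITION & SPEC =====
def Spec_getBadge (group : List String) (out : Option Int) : Prop := out = getBadge_alt group
instance (group : List String) (out : Option Int) : Decidable (Spec_getBadge group out) := by unfold Spec_getBadge; infer_instance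

-- ===== CLAIM (what is proved, stated in full; the proofs are below) =====
def Claim_equal_getBadge : Prop := ∀ (group : List String), Dom_getBadge group → Spec_getBadge group (getBadge group)

-- ===== LEMMAS AND PROOFS =====

theorem pvLineHas_iff (l : List Char) (ch : Char) : pvLineHas l ch = true ↔ ch ∈ l := by
  induction l with
  | nil => simp [pvLineHas]
  | cons c rest ih =>
      rw [pvLineHas]
      by_cases h : c == ch
      · rw [if_pos h]
        have hc : c = ch := by simpa [beq_iff_eq] using h
        subst hc
        simp
      · rw [if_neg h, ih, List.mem_cons]
        have hne : ¬ ch = c := fun e => h (by simp [e])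
        tauto

theorem pvCheckAll_cons (l : String) (rest : List String) (ch : Char) (b : Bool) :
    pvCheckAll (l :: rest) ch b
      = if pvLineHas l.toList ch = true then pvCheckAll rest ch true else false := by
  cases h : pvLineHas l.toList ch <;> simp [pvCheckAll, h]

theorem pvCheckAll_true_iff (ch : Char) :
    ∀ group : List String, pvCheckAll group ch true = true ↔ ∀ l ∈ group, ch ∈ l.toList := by
  intro group
  induction group with
  | nil => simp [pvCheckAll]
  | cons l rest ih =>
      rw [pvCheckAll_cons]
      by_cases h : pvLineHas l.toList ch = true
      · rw [if_pos h, ih]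
        have hl : ch ∈ l.toList := (pvLineHas_iff _ _).1 h
        simp only [List.mem_cons]
        constructor
        · rintro hall m (rfl | hm)
          · exact hl
          · exact hall m hm
        · intro hall m hm; exact hall m (Or.inr hm)
      · rw [if_neg h]
        simp only [Bool.false_eq_true, false_iff]
        intro hall
        exact h ((pvLineHas_iff _ _).2 (hall l List.mem_cons_self))

theorem pvCheckAll_iff (group : List String) (ch : Char) :
    pvCheckAll group ch false = true ↔ group ≠ [] ∧ ∀ l ∈ group, ch ∈ l.toList := by
  cases group with
  | nil => simp [pvCheckAll]
  | cons l rest =>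
      rw [pvCheckAll_cons, ← pvCheckAll_cons l rest ch true, pvCheckAll_true_iff]
      simp

-- the dict built by one line's distinct characters
theorem foldcnt_contains (s : List Char) (ch : Char) :
    ∀ d : PySem.Dict Char Int,
      ((s.foldl (fun d c => d.modify c 0 (· + 1)) d).contains ch)
        = (decide (ch ∈ s) || d.contains ch) := by
  induction s with
  | nil => intro d; simp
  | cons c rest ih =>
      intro d
      simp only [List.foldl_cons, ih, PySem.Dict.contains_modify, List.mem_cons]
      by_cases h : ch = c
      · simp [h]
      · have hb : (ch == c) = false := beq_eq_false_iff_ne.2 h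
        simp [h, hb]

theorem foldcnt_getD (s : List Char) (ch : Char) (hs : s.Nodup) :
    ∀ d : PySem.Dict Char Int,
      ((s.foldl (fun d c => d.modify c 0 (· + 1)) d).getD ch 0)
        = d.getD ch 0 + (if ch ∈ s then 1 else 0) := by
  induction s with
  | nil => intro d; simp
  | cons c rest ih =>
      intro d
      have hnd : rest.Nodup := (List.nodup_cons.1 hs).2
      have hcn : c ∉ rest := (List.nodup_cons.1 hs).1
      simp only [List.foldl_cons, ih hnd, List.mem_cons]
      by_cases h : ch = c
      · subst h
        rw [PySem.Dict.getD_modify_self]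
        simp [hcn]
      · rw [PySem.Dict.getD_modify_of_ne _ _ _ h]
        simp [h]

theorem build_contains (ch : Char) :
    ∀ (group : List String) (d : PySem.Dict Char Int),
      ((group.foldl
          (fun d line =>
            (PySem.Set.ofList line.toList).foldl (fun d c => d.modify c 0 (· + 1)) d)
          d).contains ch)
        = (decide (∃ l ∈ group, ch ∈ l.toList) || d.contains ch) := by
  intro group
  induction group with
  | nil => intro d; simp
  | cons l rest ih =>
      intro d
      simp only [List.foldl_cons, ih, foldcnt_contains, PySem.Set.mem_ofList]
      by_cases h : ch ∈ l.toList <;> simp [h]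

theorem build_getD (ch : Char) :
    ∀ (group : List String) (d : PySem.Dict Char Int),
      ((group.foldl
          (fun d line =>
            (PySem.Set.ofList line.toList).foldl (fun d c => d.modify c 0 (· + 1)) d)
          d).getD ch 0)
        = d.getD ch 0 + ((group.countP (fun l => decide (ch ∈ l.toList)) : Nat) : Int) := by
  intro group
  induction group with
  | nil => intro d; simp
  | cons l rest ih =>
      intro d
      simp only [List.foldl_cons, ih, List.countP_cons]
      rw [foldcnt_getD _ _ (PySem.Set.nodup_ofList _)]
      simp only [PySem.Set.mem_ofList]
      by_cases h : ch ∈ l.toList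
      · simp only [h, decide_true, if_true]
        push_cast
        ring
      · simp [h]

theorem get?_contains_getD (d : PySem.Dict Char Int) (k : Char) :
    d.get? k = if d.contains k then some (d.getD k 0) else none := by
  cases h : d.get? k <;>
    simp [PySem.Dict.contains_eq_isSome_get?, PySem.Dict.getD_eq_get?_getD, h]

-- the two per-character conditions coincide
theorem cond_eq (group : List String) (ch : Char) :
    ((pvBuildCnt group).get? ch == some (group.length : Int))
      = pvCheckAll group ch false := by
  rw [Bool.eq_iff_iff, beq_iff_eq, pvCheckAll_iff, pvBuildCnt,
      get?_contains_getD, build_contains, build_getD]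
  by_cases hc : ∃ l ∈ group, ch ∈ l.toList
  · rw [if_pos (by simp [hc])]
    simp only [PySem.Dict.getD_empty, zero_add, Option.some.injEq, Nat.cast_inj]
    rw [List.countP_eq_length]
    constructor
    · intro hcount
      rcases hc with ⟨l0, hl0, _⟩
      exact ⟨by rintro rfl; exact (List.not_mem_nil hl0), fun l hl => by
        simpa using hcount l hl⟩
    · intro ⟨_, hall⟩ l hl
      simp [hall l hl]
  · rw [if_neg (by simp [hc])]
    constructor
    · intro h; exact absurd h (by simp)
    · rintro ⟨hne, hall⟩
      rcases List.exists_mem_of_ne_nil group hne with ⟨l0, hl0⟩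
      exact absurd ⟨l0, hl0, hall l0 hl0⟩ hc

-- the two scans over the priority list coincide, given the per-character equality
theorem scan_eq (group : List String)
    (hc : ∀ ch, ((pvBuildCnt group).get? ch == some (group.length : Int))
                  = pvCheckAll group ch false) :
    ∀ (cs : List Char) (i : Int),
      (∀ k : Nat, k < cs.length → getIndexByValue (cs.getD k ' ') = some (i + k)) →
      pvBadgeLoop cs group
        = pvScan (PySem.List.enumerate cs i) (pvBuildCnt group) (group.length : Int) := by
  intro cs
  induction cs with
  | nil => intro i _; simp [pvBadgeLoop, PySem.List.enumerate_nil, pvScan]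
  | cons c rest ih =>
      intro i hidx
      rw [PySem.List.enumerate_cons]
      simp only [pvBadgeLoop, pvScan, hc c]
      by_cases h : pvCheckAll group c false
      · rw [if_pos h, if_pos h]
        have h0 := hidx 0 (by simp)
        simp only [List.getD_cons_zero, Nat.cast_zero, add_zero] at h0
        simp [h0]
      · rw [if_neg h, if_neg h]
        apply ih
        intro k hk
        have := hidx (k + 1) (by simpa using Nat.succ_lt_succ hk)
        simpa [add_assoc, add_comm, add_left_comm] using this

-- the concrete index facts for the 52-character priority list
theorem idx_facts :
    ∀ k : Nat, k < pvCharList.length →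
      getIndexByValue (pvCharList.getD k ' ') = some ((0 : Int) + k) := by
  decide

-- ===== VERDICT (by name: the statement is the Claim_ definition above) =====
theorem getBadge_spec : Claim_equal_getBadge := by
  intro group _
  unfold Spec_getBadge getBadge getBadge_alt
  exact scan_eq group (fun ch => cond_eq group ch) pvCharList 0 idx_facts
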